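-- pv_equiv track=rewrite | github.com/breivens/scriptingtalen | additional exercise series/series_10 [Python]/A/Anamonics/Anamonics.py | anahook
-- ===== SOURCE A (Python) =====
-- def anahook(root: str, anamonic: str) -> str or None:
--     def count(container: iter):
--         return {x: container.count(x) for x in set(container)}
--
--     root, anamonic = root.lower(), anamonic.lower()
--
--     for char in (a_count := count(anamonic)):
--         if count(root + char) == a_count:
--             return char
--     return None
-- ===== SOURCE B (Python) =====
-- def anahook(root: str, anamonic: str):
--     r = sorted(root.lower())
--     a = sorted(anamonic.lower())
--     if len(a) != len(r) + 1:
--         return None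
--     i = 0
--     while i < len(r) and r[i] == a[i]:
--         i += 1
--     if r[i:] == a[i + 1:]:
--         return a[i]
--     return None
-- ===== Notes on version B (the rewrite author's own statement) =====
-- stated objective: alternative
-- what changed: Replaces A's loop over candidate characters with a fresh count-dict comparison per candidate by sorting both lowercased strings once and scanning for the single inserted character (sort-and-merge instead of count-and-compare).
import Mathlib
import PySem

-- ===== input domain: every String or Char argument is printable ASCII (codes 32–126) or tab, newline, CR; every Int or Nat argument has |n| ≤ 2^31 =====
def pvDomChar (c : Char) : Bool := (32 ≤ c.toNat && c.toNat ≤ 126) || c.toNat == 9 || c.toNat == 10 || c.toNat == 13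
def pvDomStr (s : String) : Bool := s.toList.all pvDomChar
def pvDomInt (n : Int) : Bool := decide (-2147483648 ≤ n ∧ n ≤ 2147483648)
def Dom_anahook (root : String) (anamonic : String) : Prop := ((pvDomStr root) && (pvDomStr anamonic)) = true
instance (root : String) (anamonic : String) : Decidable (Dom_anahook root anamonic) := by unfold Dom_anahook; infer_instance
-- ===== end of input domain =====

-- B replaces A's per-candidate count-dict comparisons by sorting both lowercased
-- strings once and scanning for the single inserted character (alternative algorithm).

-- ===== PORT A =====
-- the inner helper `count`: {x: container.count(x) for x in set(container)}
def pvCountA (l : List Char) : PySem.Dict Char Int :=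
  (PySem.Set.ofList l).foldl (fun d x => d.insert x ((l.count x : Int))) PySem.Dict.empty

-- Python `==` on two dicts (mapping equality; PySem.Dict keys are unique)
def pvDictEq (d1 d2 : PySem.Dict Char Int) : Bool :=
  d1.size == d2.size && d1.items.all (fun kv => d2.get? kv.1 == some kv.2)

def anahook (root : String) (anamonic : String) : Option String :=
  let r := PySem.Chars.lower root.toList
  let a := PySem.Chars.lower anamonic.toList
  let aCount := pvCountA a
  (aCount.keys.find? (fun c => pvDictEq (pvCountA (r ++ [c])) aCount)).map
    (fun c => String.ofList [c])

-- ===== PORT B =====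
-- the while-loop of Source B: advance past the common sorted prefix; at the first
-- mismatch (or when r is exhausted) check r[i:] == a[i+1:] and return a[i]
def pvScanB : List Char → List Char → Option Char
  | rh :: rt, ah :: at' =>
      if rh = ah then pvScanB rt at'
      else if rh :: rt = at' then some ah else none
  | [], [ah] => some ah
  | _, _ => none

def anahook_alt (root : String) (anamonic : String) : Option String :=
  let r := PySem.List.sorted (PySem.Chars.lower root.toList) (fun x => x) false
  let a := PySem.List.sorted (PySem.Chars.lower anamonic.toList) (fun x => x) false
  if a.length ≠ r.length + 1 then none
  else (pvScanB r a).map (fun c => String.ofList [c])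

-- ===== PRECONDITION & SPEC =====
def Spec_anahook (root : String) (anamonic : String) (out : Option String) : Prop := out = anahook_alt root anamonic
instance (root : String) (anamonic : String) (out : Option String) : Decidable (Spec_anahook root anamonic out) := by unfold Spec_anahook; infer_instance

-- ===== CLAIM (what is proved, stated in full; the proofs are below) =====
def Claim_equal_anahook : Prop := ∀ (root : String) (anamonic : String), Dom_anahook root anamonic → Spec_anahook root anamonic (anahook root anamonic)

-- ===== LEMMAS AND PROOFS =====

-- A's `count` builds exactly collections.Counter of the list
theorem pvCountA_eq_counter (l : List Char) : pvCountA l = PySem.Dict.counter l := by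
  apply PySem.Dict.ext
  have h := PySem.Dict.items_foldl_insert_fresh (PySem.Set.ofList l) (fun a => a)
      (fun a => ((l.count a : Int))) PySem.Dict.empty
      (by intro a _; rfl)
      (by simp [PySem.Set.nodup_ofList l])
  simpa [pvCountA, PySem.Dict.items_counter] using h

theorem get?_counter (xs : List Char) (v : Char) :
    (PySem.Dict.counter xs).get? v = if v ∈ xs then some ((xs.count v : Int)) else none := by
  have hc := PySem.Dict.contains_counter xs v
  rw [PySem.Dict.contains_eq_isSome_get?] at hc
  have hg := PySem.Dict.getD_counter xs v
  by_cases hv : v ∈ xs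
  · have hs : ((PySem.Dict.counter xs).get? v).isSome = true := by simp [hc, hv]
    obtain ⟨w, hw⟩ := Option.isSome_iff_exists.mp hs
    have hwv : w = (xs.count v : Int) := by
      rw [show (PySem.Dict.counter xs).getD v 0 = ((PySem.Dict.counter xs).get? v).getD 0 from rfl,
        hw] at hg
      simpa using hg
    simp [hv, hw, hwv]
  · have hs : ((PySem.Dict.counter xs).get? v).isSome = false := by simp [hc, hv]
    have : (PySem.Dict.counter xs).get? v = none := Option.not_isSome_iff_eq_none.mp (by simp [hs])
    simp [hv, this]

-- Python dict equality of two Counters is multiset equality of the counted lists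
theorem pvDictEq_counter (X Y : List Char) :
    pvDictEq (PySem.Dict.counter X) (PySem.Dict.counter Y) = true ↔ X.Perm Y := by
  rw [pvDictEq, Bool.and_eq_true, beq_iff_eq, List.all_eq_true]
  constructor
  · rintro ⟨hlen, hall⟩
    rw [List.perm_iff_count]
    intro c
    have hsub : PySem.Set.ofList X ⊆ PySem.Set.ofList Y := by
      intro k hk
      have := hall (k, (X.count k : Int)) (by
        rw [PySem.Dict.items_counter]
        exact List.mem_map.mpr ⟨k, hk, rfl⟩)
      simp only [beq_iff_eq] at this
      rw [get?_counter] at this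
      by_cases hky : k ∈ Y
      · exact (PySem.Set.mem_ofList Y k).mpr hky
      · simp [hky] at this
    have hperm : (PySem.Set.ofList X).Perm (PySem.Set.ofList Y) := by
      apply List.Subperm.perm_of_length_le ((PySem.Set.nodup_ofList X).subperm hsub)
      have h1 : (PySem.Dict.counter X).size = (PySem.Set.ofList X).length := by
        show (PySem.Dict.counter X).items.length = _
        rw [PySem.Dict.items_counter]; simp
      have h2 : (PySem.Dict.counter Y).size = (PySem.Set.ofList Y).length := by
        show (PySem.Dict.counter Y).items.length = _
        rw [PySem.Dict.items_counter]; simp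
      omega
    by_cases hc : c ∈ X
    · have := hall (c, (X.count c : Int)) (by
        rw [PySem.Dict.items_counter]
        exact List.mem_map.mpr ⟨c, (PySem.Set.mem_ofList X c).mpr hc, rfl⟩)
      simp only [beq_iff_eq] at this
      rw [get?_counter] at this
      by_cases hcy : c ∈ Y
      · simp [hcy] at this; omega
      · simp [hcy] at this
    · have hcy : c ∉ Y := by
        intro hcy
        exact hc ((PySem.Set.mem_ofList X c).mp (hperm.mem_iff.mpr ((PySem.Set.mem_ofList Y c).mpr hcy)))
      simp [List.count_eq_zero_of_not_mem, hc, hcy]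
  · intro hp
    have hcount := List.perm_iff_count.mp hp
    have hmem : ∀ c, c ∈ X ↔ c ∈ Y := fun c => hp.mem_iff
    constructor
    · have : (PySem.Set.ofList X).Perm (PySem.Set.ofList Y) := by
        rw [List.perm_ext_iff_of_nodup (PySem.Set.nodup_ofList X) (PySem.Set.nodup_ofList Y)]
        intro a; rw [PySem.Set.mem_ofList, PySem.Set.mem_ofList]; exact hmem a
      show (PySem.Dict.counter X).items.length = (PySem.Dict.counter Y).items.length
      rw [PySem.Dict.items_counter, PySem.Dict.items_counter]
      simpa using this.length_eq
    · intro kv hkv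
      rw [PySem.Dict.items_counter] at hkv
      obtain ⟨k, hk, rfl⟩ := List.mem_map.mp hkv
      have hkX : k ∈ X := (PySem.Set.mem_ofList X k).mp hk
      rw [beq_iff_eq, get?_counter]
      simp [(hmem k).mp hkX, hcount k]

-- at most one character completes root into an anagram of anamonic
theorem pv_unique {R A : List Char} {c d : Char}
    (hc : (R ++ [c]).Perm A) (hd : (R ++ [d]).Perm A) : c = d := by
  by_contra hne
  have h := List.perm_iff_count.mp (hc.trans hd.symm) c
  simp [List.count_append, Ne.symm hne] at h

theorem perm_of_pvScanB_some : ∀ (r a : List Char) (c : Char),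
    pvScanB r a = some c → a.Perm (c :: r) := by
  intro r
  induction r with
  | nil =>
    intro a c h
    match a with
    | [ah] => simp [pvScanB] at h; simp [h]
    | [] => simp [pvScanB] at h
    | x :: y :: t => simp [pvScanB] at h
  | cons rh rt ih =>
    intro a c h
    match a with
    | [] => simp [pvScanB] at h
    | ah :: at' =>
      by_cases he : rh = ah
      · rw [pvScanB, if_pos he] at h
        have := ih at' c h
        subst he
        exact (this.cons rh).trans (List.Perm.swap c rh rt)
      · rw [pvScanB, if_neg he] at h
        by_cases ht : rh :: rt = at'
        · rw [if_pos ht] at h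
          obtain rfl : ah = c := by simpa using h
          rw [← ht]
        · rw [if_neg ht] at h; exact absurd h (by simp)

theorem pvScanB_some_of_perm : ∀ (r a : List Char) (c : Char),
    r.Pairwise (· ≤ ·) → a.Pairwise (· ≤ ·) → a.Perm (c :: r) → pvScanB r a = some c := by
  intro r
  induction r with
  | nil =>
    intro a c _ _ hp
    rw [List.perm_singleton.mp hp]
    rfl
  | cons rh rt ih =>
    intro a c hr ha hp
    match a, ha with
    | [], _ => exact absurd hp.length_eq (by simp)
    | ah :: at', ha =>
      by_cases he : rh = ah
      · rw [pvScanB, if_pos he]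
        apply ih at' c (List.Pairwise.sublist (List.sublist_cons_self rh rt) hr)
          (List.Pairwise.sublist (List.sublist_cons_self ah at') ha)
        have h1 := hp.erase ah
        rw [List.erase_cons_head] at h1
        subst he
        by_cases hc : c = rh
        · subst hc
          rwa [List.erase_cons_head] at h1
        · rw [List.erase_cons_tail (by simpa using hc), List.erase_cons_head] at h1
          exact h1
      · -- first mismatch: ah must be the extra char c and at' = rh :: rt
        have hac : ah = c := by
          have hmem : ah ∈ c :: rh :: rt := hp.mem_iff.mp (List.mem_cons_self)
          rcases List.mem_cons.mp hmem with h | hmem2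
          · exact h
          · exfalso
            have h1 : rh ≤ ah := by
              rcases List.mem_cons.mp hmem2 with h | h
              · exact le_of_eq h.symm
              · exact (List.pairwise_cons.mp hr).1 ah h
            have hrha : rh ∈ ah :: at' := hp.mem_iff.mpr (by simp)
            have h2 : ah ≤ rh := by
              rcases List.mem_cons.mp hrha with h | h
              · exact le_of_eq h.symm
              · exact (List.pairwise_cons.mp ha).1 rh h
            exact he (le_antisymm h1 h2)
        subst hac
        have h1 := hp.erase ah
        rw [List.erase_cons_head, List.erase_cons_head] at h1
        have h2 : at' = rh :: rt :=
          List.Perm.eq_of_pairwise (fun a b _ _ hab hba => le_antisymm hab hba)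
            (List.Pairwise.sublist (List.sublist_cons_self ah at') ha) hr h1
        rw [pvScanB, if_neg he, if_pos h2.symm]

-- the core equivalence, over the already-lowered character lists
theorem pv_core (R A : List Char) :
    ((pvCountA A).keys.find? (fun c => pvDictEq (pvCountA (R ++ [c])) (pvCountA A))).map
      (fun c => String.ofList [c]) =
    (if (PySem.List.sorted A (fun x => x) false).length
        ≠ (PySem.List.sorted R (fun x => x) false).length + 1 then none
     else (pvScanB (PySem.List.sorted R (fun x => x) false)
            (PySem.List.sorted A (fun x => x) false)).map (fun c => String.ofList [c])) := by
  have hP : ∀ c, pvDictEq (pvCountA (R ++ [c])) (pvCountA A) = true ↔ (R ++ [c]).Perm A := by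
    intro c
    rw [pvCountA_eq_counter, pvCountA_eq_counter]
    exact pvDictEq_counter (R ++ [c]) A
  have hkeys : (pvCountA A).keys = PySem.Set.ofList A := by
    rw [pvCountA_eq_counter]; exact PySem.Dict.keys_counter A
  set r := PySem.List.sorted R (fun x => x) false with hrdef
  set a := PySem.List.sorted A (fun x => x) false with hadef
  have hrperm : r.Perm R := PySem.List.sorted_perm R _ _
  have haperm : a.Perm A := PySem.List.sorted_perm A _ _
  by_cases hex : ∃ c, (R ++ [c]).Perm A
  · obtain ⟨c, hcperm⟩ := hex
    -- A's loop finds exactly c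
    have hfind : (pvCountA A).keys.find?
        (fun c => pvDictEq (pvCountA (R ++ [c])) (pvCountA A)) = some c := by
      cases e : (pvCountA A).keys.find? (fun c => pvDictEq (pvCountA (R ++ [c])) (pvCountA A)) with
      | none =>
        exfalso
        have hcA : c ∈ A := hcperm.mem_iff.mp (by simp)
        have hcK : c ∈ (pvCountA A).keys := by
          rw [hkeys]; exact (PySem.Set.mem_ofList A c).mpr hcA
        exact List.find?_eq_none.mp e c hcK ((hP c).mpr hcperm)
      | some c' =>
        have hc' : pvDictEq (pvCountA (R ++ [c'])) (pvCountA A) = true :=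
          List.find?_some (p := fun c => pvDictEq (pvCountA (R ++ [c])) (pvCountA A)) e
        rw [pv_unique ((hP c').mp hc') hcperm]
    -- B finds it too
    have hra : a.Perm (c :: r) :=
      haperm.trans (hcperm.symm.trans ((List.perm_append_singleton c R).trans
        (List.Perm.cons c hrperm.symm)))
    have hlen : a.length = r.length + 1 := by simpa using hra.length_eq
    rw [hfind, if_neg (by omega),
      pvScanB_some_of_perm r a c (PySem.List.sorted_pairwise R (fun x => x))
        (PySem.List.sorted_pairwise A (fun x => x)) hra]
  · have hfind : (pvCountA A).keys.find?
        (fun c => pvDictEq (pvCountA (R ++ [c])) (pvCountA A)) = none := by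
      rw [List.find?_eq_none]
      intro x _ hx
      exact hex ⟨x, (hP x).mp hx⟩
    rw [hfind]
    by_cases hl : a.length ≠ r.length + 1
    · rw [if_pos hl]; rfl
    · rw [if_neg hl]
      cases e : pvScanB r a with
      | none => rfl
      | some c =>
        exfalso
        have hra := perm_of_pvScanB_some r a c e
        exact hex ⟨c, ((haperm.symm.trans hra).trans ((List.Perm.cons c hrperm).trans
          (List.perm_append_singleton c R).symm)).symm⟩

-- ===== VERDICT (by name: the statement is the Claim_ definition above) =====
theorem anahook_spec : Claim_equal_anahook := by
  intro root anamonic _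
  unfold Spec_anahook anahook anahook_alt
  exact pv_core (PySem.Chars.lower root.toList) (PySem.Chars.lower anamonic.toList)
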